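-- pv_equiv track=rewrite | github.com/lingxiao/learn-adj-relation | experiments/argmax_ilp.py | all_links
-- ===== SOURCE A (Python) =====
-- def all_links(omega):
--
-- 	def go(omega, pairs):
-- 		if omega == []:
-- 			return pairs
-- 		else:
-- 			head = omega[0]
-- 			tail = omega[1:]
--
-- 			pairs1 = [(head,t) for t in tail]
--
-- 			return go(tail, pairs + pairs1)
--
-- 	if type(omega) == tuple:
-- 		omega = [o for o in omega]
--
-- 	return go(omega, [])
-- ===== SOURCE B (Python) =====
-- def all_links(omega):
--     n = len(omega)
--     result = []
--     for i in range(n):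
--         for j in range(i + 1, n):
--             result.append((omega[i], omega[j]))
--     return result
-- ===== Notes on version B (the rewrite author's own statement) =====
-- stated objective: faster
-- what changed: Replaces the recursive helper with accumulator and repeated quadratic-size list concatenation (plus the tuple special-case) by a plain nested index loop appending each pair directly.
import Mathlib
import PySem

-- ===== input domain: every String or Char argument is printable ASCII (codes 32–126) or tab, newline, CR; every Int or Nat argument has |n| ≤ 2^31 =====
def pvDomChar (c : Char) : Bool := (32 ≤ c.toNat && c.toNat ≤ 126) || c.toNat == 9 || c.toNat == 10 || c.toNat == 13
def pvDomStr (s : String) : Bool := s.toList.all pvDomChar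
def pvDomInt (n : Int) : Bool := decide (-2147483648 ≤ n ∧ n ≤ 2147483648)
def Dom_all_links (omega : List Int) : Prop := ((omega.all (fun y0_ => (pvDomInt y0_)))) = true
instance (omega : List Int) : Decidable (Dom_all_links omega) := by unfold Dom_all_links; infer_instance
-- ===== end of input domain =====

-- B replaces A's recursive accumulator helper by a plain nested index loop (simpler decomposition).

-- ===== PORT A =====
-- A's inner helper go(omega, pairs): recursion on the list with an accumulator.
def all_links_go (omega : List Int) (pairs : List (Int × Int)) : List (Int × Int) :=
  match omega with
  | [] => pairs
  | head :: tail => all_links_go tail (pairs ++ tail.map (fun t => (head, t)))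

-- (the tuple special-case of A is vacuous under the type convention: omega is a List Int)
def all_links (omega : List Int) : List (Int × Int) :=
  all_links_go omega []

-- ===== PORT B =====
def all_links_alt (omega : List Int) : List (Int × Int) :=
  let n : Int := omega.length
  (PySem.List.pyRange 0 n 1).foldl (fun result i =>
    (PySem.List.pyRange (i + 1) n 1).foldl (fun result j =>
      result ++ [(PySem.List.pyGetD omega i 0, PySem.List.pyGetD omega j 0)]) result) []

-- ===== PRECONDITION & SPEC =====
def Spec_all_links (omega : List Int) (out : List (Int × Int)) : Prop := out = all_links_alt omega
instance (omega : List Int) (out : List (Int × Int)) : Decidable (Spec_all_links omega out) := by unfold Spec_all_links; infer_instance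

-- ===== CLAIM (what is proved, stated in full; the proofs are below) =====
def Claim_equal_all_links : Prop := ∀ (omega : List Int), Dom_all_links omega → Spec_all_links omega (all_links omega)

-- ===== LEMMAS AND PROOFS =====

-- proof helper: the intended result, head paired with each later element
def pairsOf : List Int → List (Int × Int)
  | [] => []
  | h :: t => t.map (fun x => (h, x)) ++ pairsOf t

theorem all_links_go_eq (omega : List Int) :
    ∀ pairs, all_links_go omega pairs = pairs ++ pairsOf omega := by
  induction omega with
  | nil => intro pairs; simp [all_links_go, pairsOf]
  | cons h t ih => intro pairs; simp [all_links_go, pairsOf, ih]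

theorem flatMap_drop_eq_pairsOf (xs : List Int) :
    (List.range xs.length).flatMap
      (fun k => (xs.drop (k + 1)).map (fun x => (xs.getD k 0, x))) = pairsOf xs := by
  induction xs with
  | nil => simp [pairsOf]
  | cons h t ih =>
      simp only [List.length_cons, List.range_succ_eq_map, List.flatMap_cons, List.flatMap_map]
      simp only [List.drop_succ_cons, List.getD_cons_succ, List.getD_cons_zero, List.drop_zero]
      rw [ih]
      rfl

theorem alt_eq_pairsOf (xs : List Int) : all_links_alt xs = pairsOf xs := by
  unfold all_links_alt
  simp only [PySem.List.foldl_append_singleton_eq_map, PySem.List.foldl_append_eq_flatMap]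
  rw [← flatMap_drop_eq_pairsOf xs]
  rw [PySem.List.pyRange_zero_nat]
  rw [List.flatMap_map]
  apply List.flatMap_congr
  intro k hk
  simp only [List.mem_range] at hk
  have h1 : ((k : Int) + 1) ≥ 0 := by omega
  have := PySem.List.map_pyGetD_pyRange' xs (0 : Int) h1 (a := (k : Int) + 1)
  have hcast : ((k : Int) + 1).toNat = k + 1 := by omega
  rw [hcast] at this
  calc (PySem.List.pyRange ((k : Int) + 1) (xs.length : Int)).map
        (fun j => (PySem.List.pyGetD xs (k : Int) 0, PySem.List.pyGetD xs j 0))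
      = ((PySem.List.pyRange ((k : Int) + 1) (xs.length : Int)).map
          (fun j => PySem.List.pyGetD xs j 0)).map
          (fun x => (PySem.List.pyGetD xs (k : Int) 0, x)) := by
        rw [List.map_map]; rfl
    _ = (xs.drop (k + 1)).map (fun x => (xs.getD k 0, x)) := by
        rw [this, PySem.List.pyGetD_natCast]

-- ===== VERDICT (by name: the statement is the Claim_ definition above) =====
theorem all_links_spec : Claim_equal_all_links := by
  intro omega _
  unfold Spec_all_links all_links
  rw [all_links_go_eq, alt_eq_pairsOf]
  simp
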